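-- pv_equiv track=rewrite | github.com/mark-groves/skills-nexus | scripts/validate_repo.py | parse_single_quoted_yaml
-- ===== SOURCE A (Python) =====
-- def parse_single_quoted_yaml(value: str) -> str | None:
--     parts: list[str] = []
--     index = 1
--     while index < len(value):
--         char = value[index]
--         if char == "'":
--             if index + 1 < len(value) and value[index + 1] == "'":
--                 parts.append("'")
--                 index += 2
--                 continue
--             trailing = value[index + 1 :].strip()
--             if trailing:
--                 return None
--             return "".join(parts)
--         parts.append(char)
--         index += 1
--     return None
-- ===== SOURCE B (Python) =====
-- def parse_single_quoted_yaml(value: str) -> str | None: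
--     parts: list[str] = []
--     index = 1
--     while True:
--         q = value.find("'", index)
--         if q == -1:
--             return None
--         parts.append(value[index:q])
--         if q + 1 < len(value) and value[q + 1] == "'":
--             parts.append("'")
--             index = q + 2
--         else:
--             if value[q + 1 :].strip():
--                 return None
--             return "".join(parts)
-- ===== Notes on version B (the rewrite author's own statement) =====
-- stated objective: faster
-- what changed: B replaces A's per-character while-loop (testing and appending one char at a time) with a quote-to-quote loop using str.find that appends whole slices between quotes, handling the doubled-quote escape at each found quote.
import Mathlib
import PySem

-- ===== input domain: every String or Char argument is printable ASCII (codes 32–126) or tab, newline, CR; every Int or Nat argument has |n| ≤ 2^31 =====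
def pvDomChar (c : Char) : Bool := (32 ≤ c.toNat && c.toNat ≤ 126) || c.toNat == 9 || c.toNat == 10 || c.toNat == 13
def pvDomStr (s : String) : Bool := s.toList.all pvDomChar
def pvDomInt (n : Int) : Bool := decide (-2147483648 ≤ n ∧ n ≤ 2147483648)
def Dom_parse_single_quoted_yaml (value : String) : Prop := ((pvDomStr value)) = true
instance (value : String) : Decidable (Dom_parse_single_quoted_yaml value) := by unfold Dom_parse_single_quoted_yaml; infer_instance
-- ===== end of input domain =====

-- B replaces A's character-by-character scan with a quote-to-quote `str.find` loop that
-- appends whole slices between quotes (objective: faster by a constant factor — find/slicing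
-- skip quote-free runs in one call instead of one Python iteration per character).

-- ===== PORT A =====
-- A's while-loop over `index`, carrying `parts` (each append is a single character, so
-- parts is a List Char and "".join(parts) is String.mk parts).
def pvA_loop (v : List Char) (parts : List Char) (index : Nat) : Option String :=
  if _h : index < v.length then
    if v[index]! = '\'' then
      if index + 1 < v.length ∧ v[index + 1]! = '\'' then
        pvA_loop v (parts ++ ['\'']) (index + 2)
      else
        -- trailing = value[index+1:].strip(); if trailing: return None
        if PySem.Chars.strip (v.drop (index + 1)) ≠ [] then none
        else some (String.mk parts)
    else
      pvA_loop v (parts ++ [v[index]!]) (index + 1)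
  else none
termination_by v.length - index
decreasing_by all_goals omega

def parse_single_quoted_yaml (value : String) : Option String :=
  pvA_loop value.toList [] 1

-- ===== PORT B =====
-- Termination facts for B's find-based loop: a successful find lands at or after the
-- start index and strictly inside the string (cited by pvB_loop's decreasing_by).
theorem pvFind_bounds (v : List Char) (index : Nat)
    (h : PySem.Chars.findFrom v ['\''] (index : Int) none ≠ -1) :
    index ≤ v.length ∧
      index ≤ (PySem.Chars.findFrom v ['\''] (index : Int) none).toNat ∧
      (PySem.Chars.findFrom v ['\''] (index : Int) none).toNat < v.length := by
  have hle : index ≤ v.length := by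
    by_contra hgt
    apply h
    simp only [PySem.Chars.findFrom]
    have : (v.length : Int) < (index : Int) := by exact_mod_cast Nat.lt_of_not_le hgt
    simp
    omega
  have hspec := PySem.Chars.findFrom_natCast_spec v ['\''] index hle h
  refine ⟨hle, ?_, ?_⟩
  · have := hspec.1; omega
  · have hpre := hspec.2.1
    have hlen := hpre.length_le
    simp at hlen
    omega

-- B's while-True loop over `index`, carrying `parts : List (List Char)` (python strings);
-- "".join(parts) is String.mk parts.flatten.
def pvB_loop (v : List Char) (parts : List (List Char)) (index : Nat) : Option String :=
  let q := PySem.Chars.findFrom v ['\''] (index : Int) none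
  if hq : q = -1 then none
  else
    let parts1 := parts ++ [PySem.List.slice v (some (index : Int)) (some q)]
    if q.toNat + 1 < v.length ∧ v[q.toNat + 1]! = '\'' then
      pvB_loop v (parts1 ++ [['\'']]) (q.toNat + 2)
    else
      if PySem.Chars.strip (v.drop (q.toNat + 1)) ≠ [] then none
      else some (String.mk parts1.flatten)
termination_by v.length + 2 - index
decreasing_by
  have := pvFind_bounds v index hq
  omega

def parse_single_quoted_yaml_alt (value : String) : Option String :=
  pvB_loop value.toList [] 1

-- ===== PRECONDITION & SPEC =====
def Spec_parse_single_quoted_yaml (value : String) (out : Option String) : Prop := out = parse_single_quoted_yaml_alt value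
instance (value : String) (out : Option String) : Decidable (Spec_parse_single_quoted_yaml value out) := by unfold Spec_parse_single_quoted_yaml; infer_instance

-- ===== CLAIM (what is proved, stated in full; the proofs are below) =====
def Claim_equal_parse_single_quoted_yaml : Prop := ∀ (value : String), Dom_parse_single_quoted_yaml value → Spec_parse_single_quoted_yaml value (parse_single_quoted_yaml value)

-- ===== LEMMAS AND PROOFS =====

-- If no quote appears at or after `index`, A's loop falls off the end and returns none.
theorem pvA_none (v : List Char) :
    ∀ (n index : Nat) (parts : List Char), v.length - index ≤ n →
      (∀ j, index ≤ j → j < v.length → v[j]! ≠ '\'') →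
      pvA_loop v parts index = none := by
  intro n
  induction n with
  | zero =>
    intro index parts hn _
    rw [pvA_loop]
    simp only [dif_neg (by omega : ¬ index < v.length)]
  | succ n ih =>
    intro index parts hn hq
    rw [pvA_loop]
    by_cases h : index < v.length
    · simp only [dif_pos h]
      have hne : v[index]! ≠ '\'' := hq index le_rfl h
      simp only [if_neg hne]
      exact ih (index + 1) _ (by omega) (fun j h1 h2 => hq j (by omega) h2)
    · simp only [dif_neg h]

-- Walking A's loop across a quote-free segment [index, m) appends exactly that slice.
theorem pvA_skip (v : List Char) :
    ∀ (n index : Nat) (parts : List Char) (m : Nat), m - index ≤ n →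
      index ≤ m → m ≤ v.length →
      (∀ j, index ≤ j → j < m → v[j]! ≠ '\'') →
      pvA_loop v parts index = pvA_loop v (parts ++ (v.take m).drop index) m := by
  intro n
  induction n with
  | zero =>
    intro index parts m hn h1 h2 _
    have : index = m := by omega
    subst this
    simp
  | succ n ih =>
    intro index parts m hn h1 h2 hq
    by_cases heq : index = m
    · subst heq; simp
    · have hlt : index < m := by omega
      have hlen : index < v.length := by omega
      rw [pvA_loop]
      simp only [dif_pos hlen]
      have hne : v[index]! ≠ '\'' := hq index le_rfl hlt
      simp only [if_neg hne]
      have hstep := ih (index + 1) (parts ++ [v[index]!]) m (by omega) (by omega) h2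
        (fun j hj1 hj2 => hq j (by omega) hj2)
      rw [hstep]
      congr 1
      have hidxtake : index < (v.take m).length := by simp; omega
      rw [List.drop_eq_getElem_cons hidxtake]
      simp [getElem!_pos v index hlen, List.getElem_take]

-- The two loops agree whenever the flattened B-accumulator equals A's accumulator.
theorem pvLoops_eq (v : List Char) :
    ∀ (n index : Nat) (partsA : List Char) (partsB : List (List Char)),
      v.length + 2 - index ≤ n → partsB.flatten = partsA →
      pvA_loop v partsA index = pvB_loop v partsB index := by
  intro n
  induction n with
  | zero =>
    intro index partsA partsB hn hacc
    have hq : PySem.Chars.findFrom v ['\''] (index : Int) none = -1 := by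
      by_contra h
      have := (pvFind_bounds v index h).1
      omega
    rw [pvA_loop, pvB_loop]
    simp [hq, (show ¬ index < v.length by omega)]
  | succ n ih =>
    intro index partsA partsB hn hacc
    rw [pvB_loop]
    by_cases hq : PySem.Chars.findFrom v ['\''] (index : Int) none = -1
    · simp only [dif_pos hq]
      -- no quote from index on: A returns none too
      by_cases hle : index ≤ v.length
      · rw [PySem.Chars.findFrom_natCast_eq_neg_one_iff v _ index hle] at hq
        apply pvA_none v (v.length - index) index partsA le_rfl
        intro j hj1 hj2 hquote
        apply hq
        refine ⟨(v.take j).drop index, v.drop (j+1), ?_⟩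
        have hsplit : v.drop index = (v.take j).drop index ++ v[j]! :: v.drop (j+1) := by
          rw [getElem!_pos v j hj2, ← List.drop_eq_getElem_cons hj2,
            ← List.drop_append_of_le_length (by simp; omega), List.take_append_drop]
        rw [hquote] at hsplit
        simpa using hsplit.symm
      · apply pvA_none v 0 index partsA (by omega)
        intro j hj1 hj2
        omega
    · simp only [dif_neg hq]
      obtain ⟨hle, him, hm⟩ := pvFind_bounds v index hq
      set q := PySem.Chars.findFrom v ['\''] (index : Int) none with hqdef
      have hspec := PySem.Chars.findFrom_natCast_spec v ['\''] index hle hq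
      have hquote : v[q.toNat]! = '\'' := by
        obtain ⟨t, ht⟩ := hspec.2.1
        rw [List.drop_eq_getElem_cons hm] at ht
        simp only [List.singleton_append, List.cons.injEq] at ht
        rw [getElem!_pos v q.toNat hm, ← ht.1]
      have hnoq : ∀ j, index ≤ j → j < q.toNat → v[j]! ≠ '\'' := by
        intro j hj1 hj2 hj
        apply hspec.2.2 j hj1 hj2
        refine ⟨v.drop (j+1), ?_⟩
        rw [List.drop_eq_getElem_cons (by omega : j < v.length)]
        rw [getElem!_pos v j (by omega : j < v.length)] at hj
        simp [hj]
      -- slice value[index:q] = (v.take q.toNat).drop index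
      have hslice : PySem.List.slice v (some (index : Int)) (some q) = (v.take q.toNat).drop index := by
        have h0 : (0 : Int) ≤ q := le_trans (Int.natCast_nonneg index) hspec.1
        rw [← Int.toNat_of_nonneg h0, PySem.List.slice_natCast]
        rw [List.drop_take]
        congr 2
      -- advance A across the quote-free segment to position q.toNat
      rw [pvA_skip v (q.toNat - index) index partsA q.toNat le_rfl him (by omega) hnoq]
      rw [pvA_loop, dif_pos hm, if_pos hquote]
      have hacc1 : (partsB ++ [PySem.List.slice v (some (index : Int)) (some q)]).flatten
          = partsA ++ (v.take q.toNat).drop index := by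
        simp [hslice, hacc]
      by_cases hesc : q.toNat + 1 < v.length ∧ v[q.toNat + 1]! = '\''
      · rw [if_pos hesc, if_pos hesc]
        apply ih (q.toNat + 2) _ _ (by omega)
        simp [hslice, hacc]
      · rw [if_neg hesc, if_neg hesc]
        by_cases hstrip : PySem.Chars.strip (v.drop (q.toNat + 1)) ≠ []
        · simp [hstrip]
        · simp only [if_neg hstrip]
          rw [hacc1]

-- ===== VERDICT (by name: the statement is the Claim_ definition above) =====
theorem parse_single_quoted_yaml_spec : Claim_equal_parse_single_quoted_yaml := by
  intro value _
  unfold Spec_parse_single_quoted_yaml parse_single_quoted_yaml parse_single_quoted_yaml_alt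
  exact pvLoops_eq value.toList (value.toList.length + 2) 1 [] [] (by omega) rfl
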